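-- pv_equiv track=rewrite | github.com/maxim-komlik/07_Modeling_lab_01 | main.py | lehmer_analysis
-- ===== SOURCE A (Python) =====
-- def lehmer_analysis(lst):
--     # 1 702551 958821
--     # 1 125566 276128
--     # 8628 8632
--
--     period = len(lst)
--     max_unique = -1
--     i = len(lst) - 1
--     while i > 0:
--         j = i - 1
--         low_bound = max(0, i - period)
--         while j >= low_bound:
--             if lst[i] == lst[j]:
--                 if i - j < period:
--                     period = i - j
--                 break
--             j -= 1
--         else:
--             i -= 1
--             continue
--         break
--
--     if period < len(lst):
--         i = 0
--         while lst[i] != lst[i+period]: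
--             i += 1
--         else:
--             max_unique = i + period
--             if i > 0:
--                 max_unique -= 1
--     return period, max_unique
-- ===== SOURCE B (Python) =====
-- def lehmer_analysis(lst):
--     # One forward pass with a last-seen index dict finds the highest index that
--     # repeats an earlier value and its nearest previous occurrence (O(n) vs A's O(n^2)).
--     n = len(lst)
--     last = {}
--     best_i = -1
--     gap = 0
--     for i, v in enumerate(lst):
--         if v in last:
--             best_i = i
--             gap = i - last[v]
--         last[v] = i
--     period = gap if best_i >= 0 else n
--     max_unique = -1
--     if best_i >= 0:
--         f = 0
--         while lst[f] != lst[f + period]: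
--             f += 1
--         max_unique = f + period - 1 if f > 0 else f + period
--     return period, max_unique
-- ===== Notes on version B (the rewrite author's own statement) =====
-- stated objective: faster
-- what changed: Replaced A's backwards nested scan (for each i, rescan all earlier indices for an equal element) by a single forward pass with a last-seen-index dictionary that yields the highest repeating index and its nearest previous occurrence directly.
import Mathlib
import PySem

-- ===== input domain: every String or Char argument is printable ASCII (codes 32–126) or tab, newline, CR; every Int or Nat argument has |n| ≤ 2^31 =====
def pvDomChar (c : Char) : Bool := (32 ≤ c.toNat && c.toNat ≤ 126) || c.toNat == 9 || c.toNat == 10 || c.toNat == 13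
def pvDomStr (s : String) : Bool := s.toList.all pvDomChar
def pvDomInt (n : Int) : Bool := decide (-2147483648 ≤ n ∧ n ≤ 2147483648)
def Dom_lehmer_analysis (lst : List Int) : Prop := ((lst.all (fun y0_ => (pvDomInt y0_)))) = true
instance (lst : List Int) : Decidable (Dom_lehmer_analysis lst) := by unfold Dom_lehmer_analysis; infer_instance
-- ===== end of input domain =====

-- B replaces A's quadratic backwards nested scan by one forward pass with a
-- last-seen-index dictionary (objective: faster, O(n^2) -> O(n)).

-- ===== PORT A =====
-- inner while loop: j from (i_outer - 1) down to low_bound, first j with lst[j] == vi;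
-- here j = low + c - 1 counts down via c. Indices are always in range, so lst.getD is exact.
def lehmerInnerA (lst : List Int) (vi : Int) (low : Nat) : Nat → Option Int
  | 0 => none
  | c + 1 =>
      let j := low + c
      if lst.getD j 0 = vi then some (j : Int) else lehmerInnerA lst vi low c

-- outer while loop: i from len-1 down to 1; on a found j the Python sets
-- period = i - j if smaller and breaks both loops.
def lehmerOuterA (lst : List Int) (period : Int) : Nat → Int
  | 0 => period
  | i + 1 =>
      let low : Int := max 0 ((i + 1 : Int) - period)
      match lehmerInnerA lst (lst.getD (i + 1) 0) low.toNat (i + 1 - low.toNat) with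
      | some j => if (i + 1 : Int) - j < period then (i + 1 : Int) - j else period
      | none => lehmerOuterA lst period i

-- second-phase while loop: first i with lst[i] == lst[i+period]; fuel = len suffices
-- (a match exists at distance period whenever period < len).
def lehmerFindA (lst : List Int) (p : Int) : Nat → Int → Int
  | 0, i => i
  | fuel + 1, i =>
      if PySem.List.pyGetD lst i 0 ≠ PySem.List.pyGetD lst (i + p) 0 then
        lehmerFindA lst p fuel (i + 1)
      else i

def lehmer_analysis (lst : List Int) : Int × Int :=
  let n := lst.length
  let period := lehmerOuterA lst (n : Int) (n - 1)
  if period < (n : Int) then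
    let i := lehmerFindA lst period n 0
    let m := i + period
    (period, if i > 0 then m - 1 else m)
  else (period, -1)

-- ===== PORT B =====
-- loop body of Source B's single forward pass: state = (last-seen dict, best_i, gap)
def lehmerStepB (st : PySem.Dict Int Int × Int × Int) (p : Int × Int) :
    PySem.Dict Int Int × Int × Int :=
  match st, p with
  | (last, best, gap), (i, v) =>
    match last.get? v with
    | some j => (last.insert v i, i, i - j)
    | none => (last.insert v i, best, gap)

-- second-phase while loop of Source B (same scan as A's second phase)
def lehmerFindB (lst : List Int) (p : Int) : Nat → Int → Int
  | 0, i => i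
  | fuel + 1, i =>
      if PySem.List.pyGetD lst i 0 ≠ PySem.List.pyGetD lst (i + p) 0 then
        lehmerFindB lst p fuel (i + 1)
      else i

def lehmer_analysis_alt (lst : List Int) : Int × Int :=
  let n := lst.length
  let st := (PySem.List.enumerate lst).foldl lehmerStepB (PySem.Dict.empty, -1, 0)
  let best := st.2.1
  let period : Int := if best ≥ 0 then st.2.2 else (n : Int)
  if best ≥ 0 then
    let f := lehmerFindB lst period n 0
    (period, if f > 0 then f + period - 1 else f + period)
  else (period, -1)

-- ===== PRECONDITION & SPEC =====
def Spec_lehmer_analysis (lst : List Int) (out : Int × Int) : Prop := out = lehmer_analysis_alt lst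
instance (lst : List Int) (out : Int × Int) : Decidable (Spec_lehmer_analysis lst out) := by unfold Spec_lehmer_analysis; infer_instance

-- ===== CLAIM (what is proved, stated in full; the proofs are below) =====
def Claim_equal_lehmer_analysis : Prop := ∀ (lst : List Int), Dom_lehmer_analysis lst → Spec_lehmer_analysis lst (lehmer_analysis lst)

-- ===== LEMMAS AND PROOFS =====

-- best duplicate pair over indices 1..k: first (largest) i with a previous equal
-- element, paired with the nearest such previous index (proof-side reference)
def lehmerBestDup (lst : List Int) : Nat → Option (Int × Int)
  | 0 => none
  | i + 1 =>
      match lehmerInnerA lst (lst.getD (i + 1) 0) 0 (i + 1) with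
      | some j => some ((i + 1 : Int), j)
      | none => lehmerBestDup lst i

def lehmerBD (lst : List Int) (k : Nat) : Int × Int :=
  match lehmerBestDup lst k with
  | some (a, b) => (a, a - b)
  | none => (-1, 0)

theorem lehmerInnerA_bounds (lst : List Int) (v : Int) (c : Nat) (j : Int)
    (h : lehmerInnerA lst v 0 c = some j) : 0 ≤ j ∧ j < (c : Int) := by
  induction c with
  | zero => simp [lehmerInnerA] at h
  | succ c ih =>
      simp only [lehmerInnerA] at h
      split at h
      · cases h; constructor
        · positivity
        · push_cast; omega
      · have := ih h; omega

theorem lehmerInnerA_append (xs ys : List Int) (v : Int) (c : Nat) (h : c ≤ xs.length) :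
    lehmerInnerA (xs ++ ys) v 0 c = lehmerInnerA xs v 0 c := by
  induction c with
  | zero => rfl
  | succ c ih =>
      have hc : c < xs.length := by omega
      simp only [lehmerInnerA, List.getD_eq_getElem?_getD, Nat.zero_add,
        List.getElem?_append_left hc]
      rw [ih (by omega)]

theorem lehmerBestDup_bounds (lst : List Int) (k : Nat) (a b : Int)
    (h : lehmerBestDup lst k = some (a, b)) : 0 ≤ b ∧ b < a ∧ a ≤ (k : Int) := by
  induction k with
  | zero => simp [lehmerBestDup] at h
  | succ k ih =>
      simp only [lehmerBestDup] at h
      split at h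
      · rename_i j hj
        have := lehmerInnerA_bounds _ _ _ _ hj
        cases h; push_cast; omega
      · have := ih h; omega

theorem lehmerBestDup_append (xs ys : List Int) (k : Nat) (h : k < xs.length) :
    lehmerBestDup (xs ++ ys) k = lehmerBestDup xs k := by
  induction k with
  | zero => rfl
  | succ k ih =>
      have hk : k + 1 < xs.length := h
      simp only [lehmerBestDup, List.getD_eq_getElem?_getD, List.getElem?_append_left hk,
        lehmerInnerA_append xs ys _ (k + 1) (by omega)]
      rw [ih (by omega)]

theorem lehmerOuterA_eq (lst : List Int) (i : Nat) (h : i < lst.length) :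
    lehmerOuterA lst (lst.length : Int) i =
      match lehmerBestDup lst i with
      | some (a, b) => a - b
      | none => (lst.length : Int) := by
  induction i with
  | zero => rfl
  | succ i ih =>
      have hlow : max 0 ((i + 1 : Int) - (lst.length : Int)) = 0 := by
        have : (i + 1 : Int) < (lst.length : Int) := by exact_mod_cast h
        omega
      simp only [lehmerOuterA, lehmerBestDup, hlow, Int.toNat_zero, Nat.sub_zero]
      cases hj : lehmerInnerA lst (lst.getD (i + 1) 0) 0 (i + 1) with
      | none => simpa [hj] using ih (by omega)
      | some j =>
          have hb := lehmerInnerA_bounds _ _ _ _ hj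
          have : ((i : Int) + 1) - j < (lst.length : Int) := by
            have : (i + 1 : Int) < (lst.length : Int) := by exact_mod_cast h
            omega
          simp [this]

theorem lehmerBD_append (xs : List Int) (x : Int) (d : PySem.Dict Int Int)
    (best gap : Int)
    (hd : ∀ v, d.get? v = lehmerInnerA xs v 0 xs.length)
    (hb : (best, gap) = lehmerBD xs (xs.length - 1)) :
    (match d.get? x with
      | some j => ((xs.length : Int), (xs.length : Int) - j)
      | none => (best, gap)) = lehmerBD (xs ++ [x]) xs.length := by
  cases hxs : xs.length with
  | zero =>
      have hnil : xs = [] := List.length_eq_zero_iff.mp hxs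
      subst hnil
      have h0 : d.get? x = none := by rw [hd x]; rfl
      rw [h0]
      exact hb
  | succ l =>
      have hgx : (xs ++ [x]).getD (l + 1) 0 = x := by
        simp [List.getD_eq_getElem?_getD, ← hxs]
      have hin : lehmerInnerA (xs ++ [x]) x 0 (l + 1) = lehmerInnerA xs x 0 (l + 1) :=
        lehmerInnerA_append xs [x] x (l + 1) (by omega)
      rw [hd x, hxs]
      unfold lehmerBD lehmerBestDup
      rw [hgx, hin]
      cases hj : lehmerInnerA xs x 0 (l + 1) with
      | some j => push_cast; simp
      | none =>
          simp only
          rw [lehmerBestDup_append xs [x] l (by omega)]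
          rw [hxs, Nat.add_sub_cancel] at hb
          simpa [lehmerBD] using hb

theorem lehmerFold (xs : List Int) :
    (∀ v, ((PySem.List.enumerate xs).foldl lehmerStepB (PySem.Dict.empty, -1, 0)).1.get? v
        = lehmerInnerA xs v 0 xs.length) ∧
    ((PySem.List.enumerate xs).foldl lehmerStepB (PySem.Dict.empty, -1, 0)).2
        = lehmerBD xs (xs.length - 1) := by
  induction xs using List.reverseRecOn with
  | nil => exact ⟨fun v => rfl, rfl⟩
  | append_singleton xs x ih =>
      obtain ⟨ihd, ihb⟩ := ih
      have henum : PySem.List.enumerate (xs ++ [x])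
          = PySem.List.enumerate xs ++ [((xs.length : Int), x)] := by
        simp [PySem.List.enumerate_append, PySem.List.enumerate_cons, PySem.List.enumerate_nil]
      rw [henum, List.foldl_append]
      set st := (PySem.List.enumerate xs).foldl lehmerStepB (PySem.Dict.empty, -1, 0) with hst
      obtain ⟨d, best, gap⟩ := st
      simp only at ihd ihb
      have hlen : (xs ++ [x]).length = xs.length + 1 := by simp
      have hinner : ∀ v, lehmerInnerA (xs ++ [x]) v 0 (xs ++ [x]).length
          = (if x = v then some (xs.length : Int) else lehmerInnerA xs v 0 xs.length) := by
        intro v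
        rw [hlen]
        simp only [lehmerInnerA, Nat.zero_add]
        rw [show (xs ++ [x]).getD xs.length 0 = x by simp [List.getD_eq_getElem?_getD]]
        rw [lehmerInnerA_append xs [x] v xs.length (le_refl _)]
      have hBD := lehmerBD_append xs x d best gap ihd ihb
      simp only [List.foldl_cons, List.foldl_nil, lehmerStepB]
      cases hgx : d.get? x with
      | none =>
          rw [hgx] at hBD
          refine ⟨fun v => ?_, ?_⟩
          · rw [hinner v]
            show (d.insert x _).get? v = _
            rw [PySem.Dict.get?_insert, ihd v]
            rcases eq_or_ne v x with rfl | hvx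
            · simp
            · simp [hvx, Ne.symm hvx]
          · show (best, gap) = _
            rw [hlen, Nat.add_sub_cancel]
            exact hBD
      | some j =>
          rw [hgx] at hBD
          refine ⟨fun v => ?_, ?_⟩
          · rw [hinner v]
            show (d.insert x _).get? v = _
            rw [PySem.Dict.get?_insert, ihd v]
            rcases eq_or_ne v x with rfl | hvx
            · simp
            · simp [hvx, Ne.symm hvx]
          · show ((xs.length : Int), (xs.length : Int) - j) = _
            rw [hlen, Nat.add_sub_cancel]
            exact hBD

theorem lehmerFind_eq (lst : List Int) (p : Int) (fuel : Nat) (i : Int) :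
    lehmerFindA lst p fuel i = lehmerFindB lst p fuel i := by
  induction fuel generalizing i with
  | zero => rfl
  | succ fuel ih => simp only [lehmerFindA, lehmerFindB]; split <;> simp [ih]

-- ===== VERDICT (by name: the statement is the Claim_ definition above) =====
theorem lehmer_analysis_spec : Claim_equal_lehmer_analysis := by
  intro lst _
  unfold Spec_lehmer_analysis lehmer_analysis lehmer_analysis_alt
  obtain ⟨hd, hb⟩ := lehmerFold lst
  rcases Nat.eq_zero_or_pos lst.length with h0 | hn
  · obtain rfl := List.length_eq_zero_iff.mp h0
    rfl
  · simp only
    rw [lehmerOuterA_eq lst (lst.length - 1) (by omega)]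
    cases hbd : lehmerBestDup lst (lst.length - 1) with
    | none =>
        simp only [lehmerBD, hbd] at hb
        rw [hb]
        norm_num
    | some ab =>
        obtain ⟨a, b⟩ := ab
        simp only [lehmerBD, hbd] at hb
        rw [hb]
        have hbound := lehmerBestDup_bounds lst (lst.length - 1) a b hbd
        have hlt : a - b < (lst.length : Int) := by omega
        have hge : (0 : Int) ≤ a := by omega
        simp only [hlt, ge_iff_le, hge, if_pos]
        rw [lehmerFind_eq]
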